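-- pv_equiv track=rewrite | github.com/hjonghyeok/coding_trainning | 프로그래머스/기초테스트/옹알이 (1).py | solution
-- ===== SOURCE A (Python) =====
-- def solution(babbling):
--     answer = 0
--     arr = ["aya", 'ye', "woo", "ma"]
--     for i in babbling:
--         w = ''
--         cnt = 0
--         for j in i:
--             w += j
--             if w in arr:
--                 w = ''
--                 cnt += 1
--         if len(w) == 0 and cnt > 0:
--             answer += 1
--     return answer
-- ===== SOURCE B (Python) =====
-- def solution(babbling):
--     pieces = ("aya", "ye", "woo", "ma")
--
--     def ok(s):
--         if s == "":
--             return True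
--         return any(s.startswith(p) and ok(s[len(p):]) for p in pieces)
--
--     return sum(1 for w in babbling if w != "" and ok(w))
-- ===== Notes on version B (the rewrite author's own statement) =====
-- stated objective: idiomatic
-- what changed: Replaces the character-accumulating scan with per-piece reset by a recursive prefix-stripping predicate (grammar membership via recursion on suffixes), counted with sum; exact because the four pieces are prefix-free.
import Mathlib
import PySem

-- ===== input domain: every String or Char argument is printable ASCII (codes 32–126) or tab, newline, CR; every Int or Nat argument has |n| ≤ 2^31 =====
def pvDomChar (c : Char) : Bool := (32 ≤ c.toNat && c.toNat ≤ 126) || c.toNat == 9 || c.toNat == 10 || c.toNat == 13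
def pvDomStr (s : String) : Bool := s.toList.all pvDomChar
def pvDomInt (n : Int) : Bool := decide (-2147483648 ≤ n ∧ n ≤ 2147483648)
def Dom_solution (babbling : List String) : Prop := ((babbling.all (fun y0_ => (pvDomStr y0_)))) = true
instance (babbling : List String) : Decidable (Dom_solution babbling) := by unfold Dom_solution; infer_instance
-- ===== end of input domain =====

-- B replaces A's character-accumulating scan (with reset on each matched piece) by a recursive
-- prefix-stripping predicate; objective: idiomatic, same cost.

-- ===== PORT A =====
-- A's strings are handled as char lists (exact: `for j in i` iterates chars, `w += j` appends one char,
-- `w in arr` is equality with one of the four literals, `len(w) == 0` is emptiness).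
def pvArrA : List (List Char) := [['a','y','a'], ['y','e'], ['w','o','o'], ['m','a']]

def pvStepA (st : List Char × Int) (j : Char) : List Char × Int :=
  if st.1 ++ [j] ∈ pvArrA then ([], st.2 + 1) else (st.1 ++ [j], st.2)

def solution (babbling : List String) : Int :=
  babbling.foldl (fun answer i =>
    let st := i.toList.foldl pvStepA ([], 0)
    if st.1.length = 0 ∧ st.2 > 0 then answer + 1 else answer) 0

-- ===== PORT B =====
-- B uses the same four pieces; the constant pvArrA is shared between the ports.
-- B's recursive `ok`; the Nat fuel (initially the string length) only makes the same recursion total.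
def pvOk : Nat → List Char → Bool
  | _, [] => true
  | 0, _ :: _ => false
  | n + 1, j :: t =>
      pvArrA.any fun p => p.isPrefixOf (j :: t) && pvOk n ((j :: t).drop p.length)

-- `w != ""` is ported as `w.toList ≠ []` (exact: a Python str is falsy/empty iff it has no chars).
def solution_alt (babbling : List String) : Int :=
  babbling.foldl (fun acc w =>
    if w.toList ≠ [] ∧ pvOk w.toList.length w.toList = true then acc + 1 else acc) 0

-- ===== PRECONDITION & SPEC =====
def Spec_solution (babbling : List String) (out : Int) : Prop := out = solution_alt babbling
instance (babbling : List String) (out : Int) : Decidable (Spec_solution babbling out) := by unfold Spec_solution; infer_instance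

-- ===== CLAIM (what is proved, stated in full; the proofs are below) =====
def Claim_equal_solution : Prop := ∀ (babbling : List String), Dom_solution babbling → Spec_solution babbling (solution babbling)

-- ===== LEMMAS AND PROOFS =====

theorem pv_stepA_miss (w : List Char) (c : Int) (j : Char) (h : w ++ [j] ∉ pvArrA) :
    pvStepA (w, c) j = (w ++ [j], c) := by
  simp [pvStepA, h]

theorem pv_stepA_hit (w : List Char) (c : Int) (j : Char) (h : w ++ [j] ∈ pvArrA) :
    pvStepA (w, c) j = ([], c + 1) := by
  simp [pvStepA, h]

-- The count component never influences the accumulator component.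
theorem pv_fst_congr (cs : List Char) : ∀ (w : List Char) (c c' : Int),
    (cs.foldl pvStepA (w, c)).1 = (cs.foldl pvStepA (w, c')).1 := by
  induction cs with
  | nil => intro w c c'; rfl
  | cons j cs ih =>
      intro w c c'
      simp only [List.foldl]
      by_cases h : w ++ [j] ∈ pvArrA
      · rw [pv_stepA_hit _ _ _ h, pv_stepA_hit _ _ _ h]; exact ih _ _ _
      · rw [pv_stepA_miss _ _ _ h, pv_stepA_miss _ _ _ h]; exact ih _ _ _

-- The count is monotone.
theorem pv_cnt_mono (cs : List Char) : ∀ (w : List Char) (c : Int),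
    c ≤ (cs.foldl pvStepA (w, c)).2 := by
  induction cs with
  | nil => intro w c; exact le_refl c
  | cons j cs ih =>
      intro w c
      simp only [List.foldl]
      by_cases h : w ++ [j] ∈ pvArrA
      · rw [pv_stepA_hit _ _ _ h]; have := ih [] (c + 1); omega
      · rw [pv_stepA_miss _ _ _ h]; exact ih _ c

-- If the accumulator ends empty and something was consumed, the count strictly increased.
theorem pv_cnt_pos (cs : List Char) : ∀ (w : List Char) (c : Int),
    (cs.foldl pvStepA (w, c)).1 = [] → (w ≠ [] ∨ cs ≠ []) → c < (cs.foldl pvStepA (w, c)).2 := by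
  induction cs with
  | nil =>
      intro w c h1 h2
      simp only [List.foldl] at h1 ⊢
      rcases h2 with h | h
      · exact absurd h1 h
      · exact absurd rfl h
  | cons j cs ih =>
      intro w c h1 _
      simp only [List.foldl] at h1 ⊢
      by_cases h : w ++ [j] ∈ pvArrA
      · rw [pv_stepA_hit _ _ _ h]
        have := pv_cnt_mono cs [] (c + 1); omega
      · rw [pv_stepA_miss _ _ _ h] at h1 ⊢
        exact ih (w ++ [j]) c h1 (Or.inl (by simp))

-- While no extension of the accumulator matches a piece, the loop just accumulates.
theorem pv_no_match (cs : List Char) : ∀ (w : List Char) (c : Int),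
    (∀ t, t ≠ [] → t <+: cs → w ++ t ∉ pvArrA) →
    cs.foldl pvStepA (w, c) = (w ++ cs, c) := by
  induction cs with
  | nil => intro w c _; simp [List.foldl]
  | cons j cs ih =>
      intro w c h
      have hj : w ++ [j] ∉ pvArrA := h [j] (by simp) ⟨cs, rfl⟩
      simp only [List.foldl]
      rw [pv_stepA_miss _ _ _ hj]
      have hrec := ih (w ++ [j]) c (fun t ht hp => by
        have h2 := h (j :: t) (by simp) ((List.cons_prefix_cons).2 ⟨rfl, hp⟩)
        simpa [List.append_assoc] using h2)
      rw [hrec]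
      simp

-- Consuming a leading piece from the empty state resets the state and bumps the count.
theorem pv_start_piece (p : List Char) (hp : p ∈ pvArrA) (rest : List Char) (c : Int) :
    (p ++ rest).foldl pvStepA ([], c) = rest.foldl pvStepA ([], c + 1) := by
  fin_cases hp
  · have s1 : pvStepA ([], c) 'a' = (['a'], c) := by
      simp only [pvStepA]; rw [if_neg (by decide)]; rfl
    have s2 : pvStepA (['a'], c) 'y' = (['a', 'y'], c) := by
      simp only [pvStepA]; rw [if_neg (by decide)]; rfl
    have s3 : pvStepA (['a', 'y'], c) 'a' = ([], c + 1) := by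
      simp only [pvStepA]; rw [if_pos (by decide)]
    simp only [List.cons_append, List.nil_append, List.foldl, s1, s2, s3]
  · have s1 : pvStepA ([], c) 'y' = (['y'], c) := by
      simp only [pvStepA]; rw [if_neg (by decide)]; rfl
    have s2 : pvStepA (['y'], c) 'e' = ([], c + 1) := by
      simp only [pvStepA]; rw [if_pos (by decide)]
    simp only [List.cons_append, List.nil_append, List.foldl, s1, s2]
  · have s1 : pvStepA ([], c) 'w' = (['w'], c) := by
      simp only [pvStepA]; rw [if_neg (by decide)]; rfl
    have s2 : pvStepA (['w'], c) 'o' = (['w', 'o'], c) := by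
      simp only [pvStepA]; rw [if_neg (by decide)]; rfl
    have s3 : pvStepA (['w', 'o'], c) 'o' = ([], c + 1) := by
      simp only [pvStepA]; rw [if_pos (by decide)]
    simp only [List.cons_append, List.nil_append, List.foldl, s1, s2, s3]
  · have s1 : pvStepA ([], c) 'm' = (['m'], c) := by
      simp only [pvStepA]; rw [if_neg (by decide)]; rfl
    have s2 : pvStepA (['m'], c) 'a' = ([], c + 1) := by
      simp only [pvStepA]; rw [if_pos (by decide)]
    simp only [List.cons_append, List.nil_append, List.foldl, s1, s2]

-- The pieces are pairwise prefix-free.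
theorem pv_prefix_free (p q : List Char) (hp : p ∈ pvArrA) (hq : q ∈ pvArrA) (h : p <+: q) :
    p = q := by
  fin_cases hp <;> fin_cases hq <;> first | rfl | (exfalso; revert h; decide)

-- pvOk ignores the fuel as long as it is at least the length.
theorem pv_ok_fuel : ∀ (n m : Nat) (cs : List Char), cs.length ≤ n → cs.length ≤ m →
    pvOk n cs = pvOk m cs := by
  intro n
  induction n with
  | zero =>
      intro m cs h _
      have : cs = [] := List.eq_nil_of_length_eq_zero (Nat.le_zero.1 h)
      subst this; cases m <;> rfl
  | succ n ih =>
      intro m cs h hm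
      cases cs with
      | nil => cases m <;> rfl
      | cons j t =>
          cases m with
          | zero => simp at hm
          | succ m =>
              have hone : ∀ p : List Char, 1 ≤ p.length →
                  (p.isPrefixOf (j :: t) && pvOk n ((j :: t).drop p.length)) =
                  (p.isPrefixOf (j :: t) && pvOk m ((j :: t).drop p.length)) := by
                intro p hp1
                by_cases hpre : p.isPrefixOf (j :: t)
                · have h1 : ((j :: t).drop p.length).length ≤ n := by
                    simp only [List.length_drop, List.length_cons] at *; omega
                  have h2 : ((j :: t).drop p.length).length ≤ m := by
                    simp only [List.length_drop, List.length_cons] at *; omega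
                  rw [ih m _ h1 h2]
                · simp [hpre]
              simp only [pvOk, pvArrA, List.any_cons, List.any_nil]
              rw [hone ['a', 'y', 'a'] (by decide), hone ['y', 'e'] (by decide),
                  hone ['w', 'o', 'o'] (by decide), hone ['m', 'a'] (by decide)]

-- Main lemma: A's inner loop ends with an empty accumulator iff B's `ok` accepts.
theorem pv_main : ∀ (n : Nat) (cs : List Char), cs.length ≤ n →
    ((cs.foldl pvStepA ([], 0)).1 = [] ↔ pvOk cs.length cs = true) := by
  intro n
  induction n with
  | zero =>
      intro cs h
      have : cs = [] := List.eq_nil_of_length_eq_zero (Nat.le_zero.1 h)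
      subst this; simp [pvOk, List.foldl]
  | succ n ih =>
      intro cs h
      cases hcs : cs with
      | nil => simp [pvOk, List.foldl]
      | cons j t =>
          subst hcs
          by_cases hex : ∃ p ∈ pvArrA, p <+: j :: t
          · obtain ⟨p, hpmem, rest, hsplit⟩ := hex
            have hplen : 1 ≤ p.length := by fin_cases hpmem <;> decide
            have hsum : p.length + rest.length = (j :: t).length := by
              rw [← hsplit]; simp
            have hL : ((j :: t).foldl pvStepA ([], 0)).1 = (rest.foldl pvStepA ([], 0)).1 := by
              rw [← hsplit, pv_start_piece p hpmem rest 0]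
              exact pv_fst_congr rest [] 1 0
            have hrest_len : rest.length ≤ n := by
              simp only [List.length_cons] at hsum h; omega
            have hdrop : (j :: t).drop p.length = rest := by
              rw [← hsplit]; exact List.drop_left
            have hR : pvOk (j :: t).length (j :: t) = pvOk rest.length rest := by
              have hlen : (j :: t).length = ((j :: t).length - 1) + 1 := by
                simp only [List.length_cons]; omega
              rw [hlen]
              simp only [pvOk]
              rw [Bool.eq_iff_iff, List.any_eq_true]
              constructor
              · rintro ⟨q, hqmem, hq⟩
                simp only [Bool.and_eq_true, List.isPrefixOf_iff_prefix] at hq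
                have hqp : q = p := by
                  rcases List.prefix_or_prefix_of_prefix hq.1 ⟨rest, hsplit⟩ with h' | h'
                  · exact pv_prefix_free q p hqmem hpmem h'
                  · exact (pv_prefix_free p q hpmem hqmem h').symm
                subst hqp
                rw [hdrop] at hq
                rw [← hq.2]
                exact pv_ok_fuel _ _ _ le_rfl (by omega)
              · intro hok
                refine ⟨p, ?_, ?_⟩
                · exact hpmem
                · simp only [Bool.and_eq_true, List.isPrefixOf_iff_prefix]
                  refine ⟨⟨rest, hsplit⟩, ?_⟩
                  rw [hdrop, ← hok]
                  exact pv_ok_fuel _ _ _ (by omega) le_rfl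
            rw [hL, hR]
            exact ih rest hrest_len
          · simp only [not_exists, not_and] at hex
            have hA : (j :: t).foldl pvStepA ([], 0) = (j :: t, 0) := by
              have h0 := pv_no_match (j :: t) [] 0
                (fun s hs hpre hmem => hex s (by simpa using hmem) hpre)
              simpa using h0
            have hB : pvOk (j :: t).length (j :: t) = false := by
              simp only [List.length_cons, pvOk]
              rw [List.any_eq_false]
              intro q hqmem
              have hnp : ¬ q <+: j :: t := hex q hqmem
              simp [List.isPrefixOf_iff_prefix, hnp]
            rw [hA, hB]
            simp

-- Per-word equivalence of the two acceptance conditions.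
theorem pv_word (cs : List Char) :
    ((cs.foldl pvStepA ([], 0)).1.length = 0 ∧ (cs.foldl pvStepA ([], 0)).2 > 0) ↔
    (cs ≠ [] ∧ pvOk cs.length cs = true) := by
  constructor
  · rintro ⟨h1, h2⟩
    have hnil : (cs.foldl pvStepA ([], 0)).1 = [] := List.eq_nil_of_length_eq_zero h1
    have hcs : cs ≠ [] := by
      rintro rfl
      simp [List.foldl] at h2
    exact ⟨hcs, (pv_main cs.length cs le_rfl).1 hnil⟩
  · rintro ⟨h1, h2⟩
    have hnil : (cs.foldl pvStepA ([], 0)).1 = [] := (pv_main cs.length cs le_rfl).2 h2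
    refine ⟨by simp [hnil], ?_⟩
    exact pv_cnt_pos cs [] 0 hnil (Or.inr h1)

-- The two outer folds agree.
theorem pv_fold (l : List String) : ∀ (a : Int),
    l.foldl (fun answer i =>
      let st := i.toList.foldl pvStepA ([], 0)
      if st.1.length = 0 ∧ st.2 > 0 then answer + 1 else answer) a =
    l.foldl (fun acc w =>
      if w.toList ≠ [] ∧ pvOk w.toList.length w.toList = true then acc + 1 else acc) a := by
  induction l with
  | nil => intro a; rfl
  | cons s l ih =>
      intro a
      simp only [List.foldl]
      rw [if_congr (pv_word s.toList) rfl rfl, ih]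

-- ===== VERDICT (by name: the statement is the Claim_ definition above) =====
theorem solution_spec : Claim_equal_solution := by
  intro babbling _
  unfold Spec_solution solution solution_alt
  exact pv_fold babbling 0
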